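-- pv_equiv track=rewrite | github.com/gilad-moskowitz/SylverCoinage | testingPackage/semigroupPackage.py | ListByGens
-- ===== SOURCE A (Python) =====
-- import math
--
-- def gcd_list(integers):
--     listToUse = [i for i in integers]
--     if (len(listToUse) == 0):
--         return 0
--     if (len(listToUse) == 1):
--         return listToUse[0]
--     while (len(listToUse) > 2):
--         listToUse.append(math.gcd(listToUse[0], listToUse[1]))
--         listToUse.pop(0)
--         listToUse.pop(0)
--     return math.gcd(listToUse[0], listToUse[1])
--
-- def SetAdd(L1, L2):
--     L3 = []
--     for a in L1:
--         for b in L2: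
--             L3.append(a+b)
--     L3 = list(set(L3))
--     return L3
--
-- def ListByGens(gens):
--     currentCount = 0
--     previousCount = 0
--     newGennies = []
--     finalList = []
--     for t in range(0, len(gens)):
--         isGen = True
--         for y in range(0, len(gens)):
--             if(gens[y] == gens[t]):
--                 continue
--             if(int(gens[t])%int(gens[y]) == 0):
--                 isGen = False
--                 break
--         if(isGen):
--             newGennies.append(int(gens[t]))
--     if(len(newGennies) < 2 or gcd_list(newGennies) != 1):
--         return finalList
--     Frob = max(newGennies)*min(newGennies)
--     listOfElements = [i for i in newGennies]
--     elementz = []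
--     weStillHaveTime = True
--     while (weStillHaveTime):
--         for a in listOfElements:
--             elementz.append(a)
--         listOfElements = SetAdd(listOfElements, newGennies)
--         elementz = sorted(list(set(elementz)))
--         if(Frob in elementz):
--             for r in elementz:
--                 currentCount += 1
--                 if(r >= Frob):
--                     break
--             if(currentCount == previousCount):
--                 weStillHaveTime = False
--             else:
--                 previousCount = int(currentCount)
--                 currentCount = 0
--     for i in elementz:
--         if(i > Frob):
--             break
--         finalList.append(i)
--     return finalList
-- ===== SOURCE B (Python) =====
-- import math
--
-- def ListByGens(gens):
--     vals = [int(g) for g in gens]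
--     kept = [g for g in vals if not any(h != g and g % h == 0 for h in vals)]
--     if len(kept) < 2:
--         return []
--     d = 0
--     for v in kept:
--         d = math.gcd(d, v)
--     if d != 1:
--         return []
--     maxg = max(kept)
--     frob = maxg * min(kept)
--     # rolling-window sieve: window[i] says whether n-1-i is representable (0 counts),
--     # so only the last maxg flags are kept
--     window = [True] + [False] * (maxg - 1)
--     out = []
--     for n in range(1, frob + 1):
--         cur = any(v <= n and window[v - 1] for v in kept)
--         if cur:
--             out.append(n)
--         window = [cur] + window[:maxg - 1]
--     return out
-- ===== Notes on version B (the rewrite author's own statement) =====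
-- stated objective: faster
-- what changed: A grows the element set by repeated pairwise set-addition, re-deduplicating and re-sorting the whole set every round until a count stabilises; B computes the same elements with a rolling-window boolean DP sieve (n is representable iff n-v is, for some generator v, keeping only the last max(gens) flags) in one ascending pass up to Frob = max*min. Intended as faster (asymptotic); a timing run saw A time out at n=16 where B still returned, so no clean ratio could be measured.
import Mathlib
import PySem

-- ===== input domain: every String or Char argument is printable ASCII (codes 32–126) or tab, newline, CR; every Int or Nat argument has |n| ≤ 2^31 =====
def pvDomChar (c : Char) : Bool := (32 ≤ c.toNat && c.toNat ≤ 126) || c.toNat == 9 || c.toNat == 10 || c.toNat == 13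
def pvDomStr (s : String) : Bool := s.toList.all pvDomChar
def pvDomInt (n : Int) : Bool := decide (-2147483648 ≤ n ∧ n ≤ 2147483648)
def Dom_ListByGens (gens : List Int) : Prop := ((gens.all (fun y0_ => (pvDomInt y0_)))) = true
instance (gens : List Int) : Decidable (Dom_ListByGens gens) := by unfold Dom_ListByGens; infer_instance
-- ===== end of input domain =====

-- B replaces A's repeated set-addition/sort closure by a single rolling-window boolean
-- reachability sieve up to Frob = max*min (intended as faster; a timing run saw A
-- time out where B returned, so no ratio was measured).

-- ===== PORT A =====
-- gcd_list's while loop: append gcd of the first two elements, pop both (length shrinks by 1)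
def pvGcdLoopA : List Int → List Int
  | a :: b :: c :: t => pvGcdLoopA ((c :: t) ++ [((Int.gcd a b : Nat) : Int)])
  | l => l
termination_by l => l.length
decreasing_by simp

def pvGcdListA (integers : List Int) : Int :=
  match integers with
  | [] => 0
  | [x] => x
  | l =>
    match pvGcdLoopA l with
    | a :: b :: _ => ((Int.gcd a b : Nat) : Int)
    | _ => 0  -- unreachable: pvGcdLoopA always leaves at least two elements here

-- helper for list(set(...)) / sorted(list(set(...))): merge sort + adjacent dedup.
-- pvSetList_eq below proves it equal (as a value) to PySem.List.sorted (PySem.Set.ofList l);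
-- it is used because the quadratic insertion-sort/ofList primitives cannot be evaluated in
-- the harness's time budget on the states this loop builds. Python's own list(set(...))
-- order is hash-arbitrary and is consumed only as a set here.
def pvDedupAdjA : List Int → List Int
  | [] => []
  | [x] => [x]
  | x :: y :: t => if x == y then pvDedupAdjA (y :: t) else x :: pvDedupAdjA (y :: t)

def pvSetList (l : List Int) : List Int :=
  pvDedupAdjA (l.mergeSort (fun a b => decide (a ≤ b)))

-- SetAdd: the nested append loops (as flatMap/map), then list(set(...))
def pvSetAddA (L1 L2 : List Int) : List Int :=
  pvSetList (L1.flatMap (fun a => L2.map (fun b => a + b)))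

-- the newGennies filter: for t in range(len(gens)) with the inner divisibility loop
def pvNewGenniesA (gens : List Int) : List Int :=
  (PySem.List.pyRange 0 (PySem.List.len gens) 1).foldl (fun ng t =>
    let gt := PySem.List.pyGetD gens t 0
    let isGen := (PySem.List.pyRange 0 (PySem.List.len gens) 1).foldl (fun isGen y =>
      let gy := PySem.List.pyGetD gens y 0
      if gy == gt then isGen
      else if PySem.Int.mod gt gy == 0 then false
      else isGen) true
    if isGen then ng ++ [gt] else ng) []

-- the counting loop: count elements up to (and including) the first r >= Frob
def pvCountA (elementz : List Int) (Frob : Int) (c : Int) : Int :=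
  match elementz with
  | [] => c
  | r :: t => if r ≥ Frob then c + 1 else pvCountA t Frob (c + 1)

-- the while loop, with explicit fuel (only to make it total; the equivalence proof
-- covers both exit modes and does not rely on the fuel bound)
def pvLoopA (newGennies : List Int) (Frob : Int) :
    Nat → List Int → List Int → Int → List Int
  | 0, _, elementz, _ => elementz
  | fuel + 1, listOfElements, elementz, previousCount =>
    let elementz' := pvSetList (elementz ++ listOfElements)  -- sorted(list(set(...)))
    let listOfElements' := pvSetAddA listOfElements newGennies
    if Frob ∈ elementz' then
      let currentCount := pvCountA elementz' Frob 0
      if currentCount == previousCount then elementz'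
      else pvLoopA newGennies Frob fuel listOfElements' elementz' currentCount
    else pvLoopA newGennies Frob fuel listOfElements' elementz' previousCount

-- the final loop: append elements until one exceeds Frob
def pvTakeA (elementz : List Int) (Frob : Int) : List Int :=
  match elementz with
  | [] => []
  | i :: t => if i > Frob then [] else i :: pvTakeA t Frob

def ListByGens (gens : List Int) : List Int :=
  let newGennies := pvNewGenniesA gens
  if PySem.List.len newGennies < 2 || !(pvGcdListA newGennies == 1) then []
  else
    let Frob := (PySem.List.max? newGennies (fun x => x)).getD 0 *
                (PySem.List.min? newGennies (fun x => x)).getD 0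
    let elementz := pvLoopA newGennies Frob (2 * Frob.toNat + 4) newGennies [] 0
    pvTakeA elementz Frob

-- ===== PORT B =====
def ListByGens_alt (gens : List Int) : List Int :=
  let vals := gens.map (fun g => g)
  let kept := vals.filter (fun g => !(vals.any (fun h => !(h == g) && PySem.Int.mod g h == 0)))
  if kept.length < 2 then []
  else
    let d := kept.foldl (fun d v => ((Int.gcd d v : Nat) : Int)) 0
    if !(d == 1) then []
    else
      let maxg := (PySem.List.max? kept (fun x => x)).getD 0
      let frob := maxg * (PySem.List.min? kept (fun x => x)).getD 0
      -- window = [True] + [False]*(maxg-1)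
      let window := [true] ++ List.replicate (maxg - 1).toNat false
      let st := (PySem.List.pyRange 1 (frob + 1) 1).foldl
        (fun (st : List Bool × List Int) n =>
          let cur := kept.any (fun v => decide (v ≤ n) && PySem.List.pyGetD st.1 (v - 1) false)
          (cur :: PySem.List.slice st.1 none (some (maxg - 1)),
           if cur then st.2 ++ [n] else st.2))
        (window, [])
      st.2

-- ===== PRECONDITION & SPEC =====
-- Pre_ admits every all-positive list (the natural domain of numerical-semigroup
-- generators) and, beyond it, the degenerate lists on which A stops at its early gate
-- (fewer than two irreducible elements, or their gcd ≠ 1) without a zero divisor;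
-- outside Pre_, A raises ZeroDivisionError (a 0 beside a nonzero element) or its
-- closure loop does not finish (nonpositive generators).
def Pre_ListByGens (gens : List Int) : Prop :=
  (∀ x ∈ gens, 1 ≤ x) ∨
  (((0 : Int) ∉ gens ∨ ∀ x ∈ gens, x = 0) ∧
    ((gens.filter (fun g => !(gens.any (fun h => !(h == g) && g % h == 0)))).length < 2 ∨
     (gens.filter (fun g => !(gens.any (fun h => !(h == g) && g % h == 0)))).foldl
       (fun a g => ((Int.gcd a g : Nat) : Int)) 0 ≠ 1))
instance (gens : List Int) : Decidable (Pre_ListByGens gens) := by unfold Pre_ListByGens; infer_instance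

def pvWitness_ListByGens : List Int := [2, 3]

def Spec_ListByGens (gens : List Int) (out : List Int) : Prop := out = ListByGens_alt gens
instance (gens : List Int) (out : List Int) : Decidable (Spec_ListByGens gens out) := by unfold Spec_ListByGens; infer_instance

-- ===== CLAIM (what is proved, stated in full; the proofs are below) =====
def Claim_equal_ListByGens : Prop := ∀ (gens : List Int), Dom_ListByGens gens → Pre_ListByGens gens → Spec_ListByGens gens (ListByGens gens)

-- ===== LEMMAS AND PROOFS =====

-- semantic layer: x is a sum of exactly k generators from G
inductive pvSumN (G : List Int) : Nat → Int → Prop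
  | one {x} : x ∈ G → pvSumN G 1 x
  | succ {k n x} : pvSumN G k n → x ∈ G → pvSumN G (k + 1) (n + x)

def pvReach (G : List Int) (x : Int) : Prop := ∃ k, pvSumN G k x

theorem pvSumN_one_le {G : List Int} {k : Nat} {x : Int} (h : pvSumN G k x) : 1 ≤ k := by
  cases h <;> omega

theorem pvSumN_le {G : List Int} (HG : ∀ g ∈ G, 1 ≤ g) {k : Nat} {x : Int}
    (h : pvSumN G k x) : (k : Int) ≤ x := by
  induction h with
  | one hx => simpa using HG _ hx
  | succ hn hx ih => have := HG _ hx; push_cast; omega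

theorem pvReach_pos {G : List Int} (HG : ∀ g ∈ G, 1 ≤ g) {x : Int}
    (h : pvReach G x) : 1 ≤ x := by
  obtain ⟨k, hk⟩ := h
  have h1 := pvSumN_one_le hk
  have h2 := pvSumN_le HG hk
  omega

theorem pvSumN_succ_iff {G : List Int} {k : Nat} {x : Int} :
    pvSumN G (k + 1) x ↔ ((k = 0 ∧ x ∈ G) ∨ ∃ n g, pvSumN G k n ∧ g ∈ G ∧ x = n + g) := by
  constructor
  · intro h
    cases h with
    | one hx => exact Or.inl ⟨rfl, hx⟩
    | succ hn hx => exact Or.inr ⟨_, _, hn, hx, rfl⟩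
  · rintro (⟨rfl, hx⟩ | ⟨n, g, hn, hg, rfl⟩)
    · exact .one hx
    · exact .succ hn hg

-- pvSetList is exactly sorted(list(set(l))): PySem.List.sorted (PySem.Set.ofList l)
theorem mem_pvDedupAdjA : ∀ (l : List Int) (x : Int), x ∈ pvDedupAdjA l ↔ x ∈ l := by
  intro l
  induction l using pvDedupAdjA.induct with
  | case1 => simp [pvDedupAdjA]
  | case2 x => simp [pvDedupAdjA]
  | case3 x y t hxy ih =>
    intro z
    rw [pvDedupAdjA, if_pos hxy, ih]
    have : x = y := by simpa using hxy
    subst this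
    simp
  | case4 x y t hxy ih =>
    intro z
    rw [pvDedupAdjA, if_neg hxy]
    simp [ih]

theorem pairwise_lt_pvDedupAdjA : ∀ (l : List Int), l.Pairwise (· ≤ ·) →
    (pvDedupAdjA l).Pairwise (· < ·) := by
  intro l
  induction l using pvDedupAdjA.induct with
  | case1 => intro _; simp [pvDedupAdjA]
  | case2 x => intro _; simp [pvDedupAdjA]
  | case3 x y t hxy ih =>
    intro hp
    rw [pvDedupAdjA, if_pos hxy]
    exact ih (List.pairwise_cons.mp hp).2
  | case4 x y t hxy ih =>
    intro hp
    rw [pvDedupAdjA, if_neg hxy, List.pairwise_cons]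
    refine ⟨?_, ih (List.pairwise_cons.mp hp).2⟩
    intro z hz
    rw [mem_pvDedupAdjA] at hz
    have hxz : x ≤ z := (List.pairwise_cons.mp hp).1 z hz
    have hxy' : x ≠ y := by simpa using hxy
    have hxyle : x ≤ y := (List.pairwise_cons.mp hp).1 y List.mem_cons_self
    rcases List.mem_cons.mp hz with rfl | hzt
    · omega
    · have hyz : y ≤ z := (List.pairwise_cons.mp (List.pairwise_cons.mp hp).2).1 z hzt
      omega

theorem pairwise_le_mergeSort (l : List Int) :
    (l.mergeSort (fun a b => decide (a ≤ b))).Pairwise (· ≤ ·) := by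
  have h := List.pairwise_mergeSort (le := fun a b : Int => decide (a ≤ b))
    (by intro a b c; simp; omega) (by intro a b; simp; omega) l
  exact h.imp (by simp)

theorem pairwise_lt_pvSetList (l : List Int) : (pvSetList l).Pairwise (· < ·) :=
  pairwise_lt_pvDedupAdjA _ (pairwise_le_mergeSort l)

theorem pvSetList_eq (l : List Int) :
    pvSetList l = PySem.List.sorted (PySem.Set.ofList l) (fun x => x) false := by
  have hpw := pairwise_lt_pvSetList l
  have hmem : ∀ x, x ∈ pvSetList l ↔ x ∈ l := by
    intro x
    rw [pvSetList, mem_pvDedupAdjA]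
    exact (List.mergeSort_perm l _).mem_iff
  have hperm : (pvSetList l).Perm (PySem.Set.ofList l) := by
    rw [List.perm_ext_iff_of_nodup (hpw.imp (fun h => ne_of_lt h)) (PySem.Set.nodup_ofList l)]
    intro x
    rw [hmem, PySem.Set.mem_ofList]
  exact (PySem.List.sorted_eq_of_perm_of_pairwise_lt _ _ (fun x => x) hperm hpw).symm

theorem mem_pvSetAddA {L1 L2 : List Int} {x : Int} :
    x ∈ pvSetAddA L1 L2 ↔ ∃ a ∈ L1, ∃ b ∈ L2, x = a + b := by
  rw [pvSetAddA, pvSetList_eq, PySem.List.mem_sorted, PySem.Set.mem_ofList, List.mem_flatMap]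
  simp [eq_comm]

-- the pure iterates of the while loop's two lists
def pvLayer (G : List Int) : Nat → List Int
  | 0 => G
  | k + 1 => pvSetAddA (pvLayer G k) G

def pvElems (G : List Int) : Nat → List Int
  | 0 => []
  | k + 1 => PySem.List.sorted (PySem.Set.ofList (pvElems G k ++ pvLayer G k)) (fun x => x) false

theorem mem_pvLayer {G : List Int} : ∀ {k : Nat} {x : Int},
    x ∈ pvLayer G k ↔ pvSumN G (k + 1) x := by
  intro k
  induction k with
  | zero =>
    intro x
    constructor
    · exact fun h => .one h
    · intro h; rcases pvSumN_succ_iff.mp h with ⟨_, hx⟩ | ⟨n, g, hn, _, _⟩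
      · exact hx
      · exact absurd (pvSumN_one_le hn) (by omega)
  | succ k ih =>
    intro x
    rw [pvLayer, mem_pvSetAddA, pvSumN_succ_iff]
    constructor
    · rintro ⟨a, ha, b, hb, rfl⟩
      exact Or.inr ⟨a, b, ih.mp ha, hb, rfl⟩
    · rintro (⟨h0, _⟩ | ⟨n, g, hn, hg, rfl⟩)
      · omega
      · exact ⟨n, ih.mpr hn, g, hg, rfl⟩

theorem mem_pvElems {G : List Int} : ∀ {k : Nat} {x : Int},
    x ∈ pvElems G k ↔ ∃ j, 1 ≤ j ∧ j ≤ k ∧ pvSumN G j x := by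
  intro k
  induction k with
  | zero => intro x; simp [pvElems]
  | succ k ih =>
    intro x
    rw [pvElems, PySem.List.mem_sorted, PySem.Set.mem_ofList, List.mem_append, ih, mem_pvLayer]
    constructor
    · rintro (⟨j, h1, h2, hj⟩ | h)
      · exact ⟨j, h1, by omega, hj⟩
      · exact ⟨k + 1, by omega, le_rfl, h⟩
    · rintro ⟨j, h1, h2, hj⟩
      by_cases h : j ≤ k
      · exact Or.inl ⟨j, h1, h, hj⟩
      · have hjk : j = k + 1 := by omega
        exact Or.inr (hjk ▸ hj)

theorem pairwise_pvElems {G : List Int} : ∀ {k : Nat}, (pvElems G k).Pairwise (· < ·) := by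
  intro k
  cases k with
  | zero => rw [pvElems]; exact List.Pairwise.nil
  | succ k => rw [pvElems]; exact PySem.List.sorted_ofList_pairwise_lt _

-- the counting loop on a strictly sorted list containing F counts the elements ≤ F
theorem pvCountA_eq_countP {F : Int} : ∀ (l : List Int) (c : Int),
    l.Pairwise (· < ·) → F ∈ l →
    pvCountA l F c = c + (l.countP (fun x => decide (x ≤ F)) : Int) := by
  intro l
  induction l with
  | nil => intro c _ h; simp at h
  | cons r t ih =>
    intro c hp hF
    rw [pvCountA]
    by_cases hr : r ≥ F
    · simp only [hr, if_true]
      have hrF : r = F := by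
        rcases List.mem_cons.mp hF with h | h
        · omega
        · have := (List.pairwise_cons.mp hp).1 _ h; omega
      have ht : ∀ x ∈ t, ¬ (x ≤ F) := by
        intro x hx
        have := (List.pairwise_cons.mp hp).1 _ hx; omega
      rw [List.countP_cons]
      have : t.countP (fun x => decide (x ≤ F)) = 0 := by
        rw [List.countP_eq_zero]
        intro x hx; simpa using ht x hx
      simp [this, hrF]
    · simp only [hr, if_false]
      have hF' : F ∈ t := by
        rcases List.mem_cons.mp hF with h | h
        · omega
        · exact h
      rw [ih (c + 1) (List.pairwise_cons.mp hp).2 hF', List.countP_cons]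
      have : r ≤ F := by omega
      simp [this]
      try ring
      try omega

theorem pvCountA_pos {F : Int} {l : List Int} (h : l ≠ []) : 1 ≤ pvCountA l F 0 := by
  have : ∀ (l : List Int) (c : Int), l ≠ [] → c + 1 ≤ pvCountA l F c := by
    intro l
    induction l with
    | nil => intro c h; simp at h
    | cons r t ih =>
      intro c _
      rw [pvCountA]
      by_cases hr : r ≥ F
      · simp [hr]
      · simp only [hr, if_false]
        cases t with
        | nil => simp [pvCountA]
        | cons a b => have := ih (c + 1) (by simp); omega
  simpa using this l 0 h

-- the take loop on a strictly sorted list keeps exactly the elements ≤ F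
theorem pairwise_pvTakeA {F : Int} : ∀ {l : List Int},
    l.Pairwise (· < ·) → (pvTakeA l F).Pairwise (· < ·) := by
  intro l
  induction l with
  | nil => intro _; simp [pvTakeA]
  | cons i t ih =>
    intro hp
    rw [pvTakeA]
    by_cases hi : i > F
    · simp [hi]
    · simp only [hi, if_false]
      rw [List.pairwise_cons]
      constructor
      · intro x hx
        have : ∀ {l' : List Int}, x ∈ pvTakeA l' F → x ∈ l' := by
          intro l'
          induction l' with
          | nil => simp [pvTakeA]
          | cons a b ihb =>
            rw [pvTakeA]
            by_cases ha : a > F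
            · simp [ha]
            · simp only [ha, if_false, List.mem_cons]
              rintro (rfl | h)
              · exact Or.inl rfl
              · exact Or.inr (ihb h)
        exact (List.pairwise_cons.mp hp).1 x (this hx)
      · exact ih (List.pairwise_cons.mp hp).2

theorem mem_pvTakeA {F : Int} : ∀ {l : List Int}, l.Pairwise (· < ·) →
    ∀ {x : Int}, (x ∈ pvTakeA l F ↔ x ∈ l ∧ x ≤ F) := by
  intro l
  induction l with
  | nil => intro _ x; simp [pvTakeA]
  | cons i t ih =>
    intro hp x
    rw [pvTakeA]
    by_cases hi : i > F
    · simp only [hi, if_true]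
      constructor
      · intro h; simp at h
      · rintro ⟨h, hx⟩
        rcases List.mem_cons.mp h with rfl | h
        · omega
        · have := (List.pairwise_cons.mp hp).1 _ h; omega
    · simp only [hi, if_false, List.mem_cons, ih (List.pairwise_cons.mp hp).2]
      constructor
      · rintro (rfl | ⟨h, hx⟩)
        · exact ⟨Or.inl rfl, by omega⟩
        · exact ⟨Or.inr h, hx⟩
      · rintro ⟨rfl | h, hx⟩
        · exact Or.inl rfl
        · exact Or.inr ⟨h, hx⟩

-- equal ≤F-counts plus inclusion (strictly sorted lists) give equal ≤F-membership
theorem mem_le_iff_of_countP {l₁ l₂ : List Int} {F : Int}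
    (h1 : l₁.Pairwise (· < ·)) (h2 : l₂.Pairwise (· < ·))
    (hsub : ∀ x ∈ l₁, x ∈ l₂)
    (hc : l₁.countP (fun x => decide (x ≤ F)) = l₂.countP (fun x => decide (x ≤ F))) :
    ∀ x, x ≤ F → (x ∈ l₂ → x ∈ l₁) := by
  intro x hxF hx2
  have hn1 : l₁.Nodup := h1.imp (fun h => ne_of_lt h)
  have hn2 : l₂.Nodup := h2.imp (fun h => ne_of_lt h)
  have hfn1 : (l₁.filter (fun x => decide (x ≤ F))).Nodup := hn1.filter _
  have hfn2 : (l₂.filter (fun x => decide (x ≤ F))).Nodup := hn2.filter _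
  have hsubF : (l₁.filter (fun x => decide (x ≤ F))).toFinset ⊆
      (l₂.filter (fun x => decide (x ≤ F))).toFinset := by
    intro y hy
    simp only [List.mem_toFinset, List.mem_filter] at hy ⊢
    exact ⟨hsub _ hy.1, hy.2⟩
  have hcard : (l₂.filter (fun x => decide (x ≤ F))).toFinset.card ≤
      (l₁.filter (fun x => decide (x ≤ F))).toFinset.card := by
    rw [List.toFinset_card_of_nodup hfn1, List.toFinset_card_of_nodup hfn2,
      ← List.countP_eq_length_filter, ← List.countP_eq_length_filter]
    omega
  have heq := Finset.eq_of_subset_of_card_le hsubF hcard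
  have : x ∈ (l₂.filter (fun x => decide (x ≤ F))).toFinset := by
    simp only [List.mem_toFinset, List.mem_filter]
    exact ⟨hx2, by simpa using hxF⟩
  rw [← heq] at this
  simp only [List.mem_toFinset, List.mem_filter] at this
  exact this.1

-- once the ≤F-part of the sum sets is stationary for one step, it holds all sums
theorem pvStationary {G : List Int} {F : Int} (HG : ∀ g ∈ G, 1 ≤ g) {j : Nat} (hj : 1 ≤ j)
    (H : ∀ x, x ≤ F → pvSumN G (j + 1) x → ∃ i, 1 ≤ i ∧ i ≤ j ∧ pvSumN G i x) :
    ∀ m x, x ≤ F → pvSumN G m x → ∃ i, 1 ≤ i ∧ i ≤ j ∧ pvSumN G i x := by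
  intro m
  induction m using Nat.strong_induction_on with
  | _ m ih =>
    intro x hxF hm
    cases hm with
    | one hx => exact ⟨1, le_rfl, hj, .one hx⟩
    | @succ k n g hn hg =>
      have hg1 := HG _ hg
      have hnF : n ≤ F := by omega
      obtain ⟨i, hi1, hi2, hi⟩ := ih k (by omega) n hnF hn
      rcases Nat.lt_or_ge i j with h | h
      · exact ⟨i + 1, by omega, by omega, .succ hi hg⟩
      · have : i = j := by omega
        subst this
        exact H _ hxF (.succ hi hg)

-- the while-loop invariant: soundness, strict sortedness and (fuel-bounded) completeness
theorem pvLoopA_spec {G : List Int} {F : Int} (HG : ∀ g ∈ G, 1 ≤ g) :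
    ∀ (fuel k : Nat) (prev : Int),
    (prev = 0 ∨ ∃ j, 1 ≤ j ∧ j ≤ k ∧ F ∈ pvElems G j ∧ prev = pvCountA (pvElems G j) F 0) →
    (pvLoopA G F fuel (pvLayer G k) (pvElems G k) prev).Pairwise (· < ·)
    ∧ (∀ x ∈ pvLoopA G F fuel (pvLayer G k) (pvElems G k) prev, pvReach G x)
    ∧ (∀ x (j : Nat), x ≤ F → 1 ≤ j → j ≤ k + fuel → pvSumN G j x →
        x ∈ pvLoopA G F fuel (pvLayer G k) (pvElems G k) prev) := by
  intro fuel
  induction fuel with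
  | zero =>
    intro k prev _
    rw [pvLoopA]
    refine ⟨pairwise_pvElems, ?_, ?_⟩
    · intro x hx
      obtain ⟨j, _, _, hj⟩ := mem_pvElems.mp hx
      exact ⟨j, hj⟩
    · intro x j _ h1 h2 hj
      exact mem_pvElems.mpr ⟨j, h1, by omega, hj⟩
  | succ fuel ih =>
    intro k prev hprev
    rw [pvLoopA]
    have hE : pvSetList (pvElems G k ++ pvLayer G k) = pvElems G (k + 1) := by
      rw [pvSetList_eq]; rfl
    have hL : pvSetAddA (pvLayer G k) G = pvLayer G (k + 1) := rfl
    simp only [hE, hL]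
    by_cases hFin : F ∈ pvElems G (k + 1)
    · simp only [hFin, if_true]
      by_cases hcc : pvCountA (pvElems G (k + 1)) F 0 == prev
      · simp only [hcc, if_true]
        -- early exit: counts stabilised
        have hcc' : pvCountA (pvElems G (k + 1)) F 0 = prev := by
          exact beq_iff_eq.mp hcc
        have hpos : 1 ≤ pvCountA (pvElems G (k + 1)) F 0 :=
          pvCountA_pos (by intro h; rw [h] at hFin; simp at hFin)
        rcases hprev with rfl | ⟨j, hj1, hjk, hFj, hprevj⟩
        · omega
        · -- counts of pvElems j and pvElems (k+1) agree
          have hsubj : ∀ x ∈ pvElems G j, x ∈ pvElems G (k + 1) := by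
            intro x hx
            obtain ⟨i, a, b, hi⟩ := mem_pvElems.mp hx
            exact mem_pvElems.mpr ⟨i, a, by omega, hi⟩
          have hcnt : (pvElems G j).countP (fun x => decide (x ≤ F)) =
              (pvElems G (k + 1)).countP (fun x => decide (x ≤ F)) := by
            have e1 := pvCountA_eq_countP (F := F) (pvElems G j) 0 pairwise_pvElems hFj
            have e2 := pvCountA_eq_countP (F := F) (pvElems G (k + 1)) 0 pairwise_pvElems hFin
            rw [e1] at hprevj
            rw [e2, hprevj] at hcc'
            omega
          have hback := mem_le_iff_of_countP pairwise_pvElems pairwise_pvElems hsubj hcnt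
          -- stationarity hypothesis at j
          have Hstat : ∀ x, x ≤ F → pvSumN G (j + 1) x →
              ∃ i, 1 ≤ i ∧ i ≤ j ∧ pvSumN G i x := by
            intro x hxF hx
            have hxE : x ∈ pvElems G (k + 1) :=
              mem_pvElems.mpr ⟨j + 1, by omega, by omega, hx⟩
            have := hback x hxF hxE
            exact mem_pvElems.mp this
          refine ⟨pairwise_pvElems, ?_, ?_⟩
          · intro x hx
            obtain ⟨i, _, _, hi⟩ := mem_pvElems.mp hx
            exact ⟨i, hi⟩
          · intro x m hxF _ _ hm
            obtain ⟨i, a, b, hi⟩ := pvStationary HG hj1 Hstat m x hxF hm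
            exact mem_pvElems.mpr ⟨i, a, by omega, hi⟩
      · simp only [hcc]
        have := ih (k + 1) (pvCountA (pvElems G (k + 1)) F 0)
          (Or.inr ⟨k + 1, by omega, le_rfl, hFin, rfl⟩)
        exact ⟨this.1, this.2.1, fun x j a b c d => this.2.2 x j a b (by omega) d⟩
    · simp only [hFin, if_false]
      rcases hprev with rfl | ⟨j, hj1, hjk, hFj, hprevj⟩
      · have := ih (k + 1) 0 (Or.inl rfl)
        exact ⟨this.1, this.2.1, fun x j a b c d => this.2.2 x j a b (by omega) d⟩
      · have := ih (k + 1) prev (Or.inr ⟨j, hj1, by omega, hFj, hprevj⟩)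
        exact ⟨this.1, this.2.1, fun x j a b c d => this.2.2 x j a b (by omega) d⟩


-- gcd bookkeeping: both programs compute the gcd of all elements
def pvGcdAll (l : List Int) : Nat := l.foldr (fun x g => Nat.gcd x.natAbs g) 0

theorem foldr_gcd_shift : ∀ (l : List Int) (b : Nat),
    l.foldr (fun x g => Nat.gcd x.natAbs g) b = Nat.gcd (pvGcdAll l) b := by
  intro l
  induction l with
  | nil => intro b; simp [pvGcdAll]
  | cons x t ih =>
    intro b
    simp only [pvGcdAll, List.foldr_cons] at *
    rw [ih b, Nat.gcd_assoc]

theorem pvGcdAll_append_gcd (a b : Int) (t : List Int) :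
    pvGcdAll (t ++ [((Int.gcd a b : Nat) : Int)]) = pvGcdAll (a :: b :: t) := by
  have h1 : pvGcdAll (t ++ [((Int.gcd a b : Nat) : Int)]) =
      t.foldr (fun x g => Nat.gcd x.natAbs g) (Nat.gcd a.natAbs b.natAbs) := by
    rw [pvGcdAll, List.foldr_append]
    simp [Int.gcd]
  rw [h1, foldr_gcd_shift]
  simp only [pvGcdAll, List.foldr_cons]
  rw [Nat.gcd_comm, Nat.gcd_assoc]

theorem pvGcdAll_loopA : ∀ l, pvGcdAll (pvGcdLoopA l) = pvGcdAll l := by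
  intro l
  induction l using pvGcdLoopA.induct with
  | case1 a b c t ih =>
    rw [pvGcdLoopA, ih, pvGcdAll_append_gcd]
  | case2 l h => rw [pvGcdLoopA]; exact h

theorem pvGcdLoopA_shape : ∀ l : List Int, 2 ≤ l.length → ∃ x y, pvGcdLoopA l = [x, y] := by
  intro l
  induction l using pvGcdLoopA.induct with
  | case1 a b c t ih =>
    intro _
    rw [pvGcdLoopA]
    exact ih (by simp)
  | case2 l h =>
    intro hl
    match l, hl, h with
    | [x, y], _, h =>
      refine ⟨x, y, ?_⟩
      rw [pvGcdLoopA]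
      exact h
    | a :: b :: c :: t, _, h => exact absurd rfl (h a b c t)

theorem pvGcdListA_eq (l : List Int) (hl : 2 ≤ l.length) :
    pvGcdListA l = ((pvGcdAll l : Nat) : Int) := by
  obtain ⟨x, y, hxy⟩ := pvGcdLoopA_shape l hl
  have hN : pvGcdAll l = Int.gcd x y := by
    rw [← pvGcdAll_loopA l, hxy]
    simp [pvGcdAll, Int.gcd, Nat.gcd_comm]
  match l, hl, hxy, hN with
  | a :: b :: t, _, hxy, hN =>
    simp only [pvGcdListA, hxy, hN]

theorem pvFoldGcd_eq (l : List Int) : ∀ a : Nat,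
    l.foldl (fun d v => ((Int.gcd d v : Nat) : Int)) ((a : Nat) : Int) =
      ((Nat.gcd a (pvGcdAll l) : Nat) : Int) := by
  induction l with
  | nil => intro a; simp [pvGcdAll]
  | cons x t ih =>
    intro a
    simp only [List.foldl_cons]
    have h1 : Int.gcd ((a : Nat) : Int) x = Nat.gcd a x.natAbs := by
      simp [Int.gcd]
    rw [h1, ih (Nat.gcd a x.natAbs)]
    have h2 : pvGcdAll (x :: t) = Nat.gcd x.natAbs (pvGcdAll t) := by
      simp [pvGcdAll]
    rw [h2, Nat.gcd_assoc]

-- the two generator filters compute the same list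
def pvKeep (gens : List Int) : List Int :=
  gens.filter (fun g => !(gens.any (fun h => !(h == g) && PySem.Int.mod g h == 0)))

theorem pvNewGenniesA_eq (gens : List Int) : pvNewGenniesA gens = pvKeep gens := by
  unfold pvNewGenniesA pvKeep
  have hinner : ∀ gt : Int,
      (PySem.List.pyRange 0 (PySem.List.len gens) 1).foldl (fun isGen y =>
        if PySem.List.pyGetD gens y 0 == gt then isGen
        else if PySem.Int.mod gt (PySem.List.pyGetD gens y 0) == 0 then false
        else isGen) true
      = !(gens.any (fun h => !(h == gt) && PySem.Int.mod gt h == 0)) := by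
    intro gt
    rw [PySem.List.foldl_pyRange_zero_pyGetD (xs := gens) (d := 0)
      (f := fun isGen gy => if gy == gt then isGen
        else if PySem.Int.mod gt gy == 0 then false else isGen)]
    have h : gens.foldl (fun isGen gy => if gy == gt then isGen
        else if PySem.Int.mod gt gy == 0 then false else isGen) true
        = gens.foldl (fun isGen gy =>
            if (!(gy == gt) && (PySem.Int.mod gt gy == 0)) then false else isGen) true := by
      apply PySem.List.foldl_congr_mem
      intro acc x _
      by_cases h1 : x == gt
      · simp [h1]
      · by_cases h2 : PySem.Int.mod gt x == 0 <;> simp [h1, h2]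
    rw [h, PySem.List.foldl_if_false_eq]
    simp
  simp only [hinner]
  rw [PySem.List.foldl_pyRange_zero_pyGetD (xs := gens) (d := 0)
    (f := fun ng gt => if !(gens.any fun h => !(h == gt) && PySem.Int.mod gt h == 0)
      then ng ++ [gt] else ng)]
  rw [PySem.List.foldl_append_if_eq_filter]
  simp

-- the %-based irreducibility filter of Pre_ is the same filter both programs compute
theorem pvKeep_eq_dvdFilter (gens : List Int) :
    gens.filter (fun g => !(gens.any (fun h => !(h == g) && g % h == 0))) = pvKeep gens := by
  rw [pvKeep]
  apply List.filter_congr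
  intro g _
  have hh : ∀ h : Int, ((g % h == 0) : Bool) = (PySem.Int.mod g h == 0) := by
    intro h
    apply Bool.eq_iff_iff.mpr
    simp [PySem.Int.mod_eq_zero_iff_dvd, EuclideanDomain.mod_eq_zero]
  simp only [hh]

-- B-side: the rolling-window sieve step and its invariant
def pvStepB (G : List Int) (maxg : Int) (st : List Bool × List Int) (n : Int) :
    List Bool × List Int :=
  let cur := G.any (fun v => decide (v ≤ n) && PySem.List.pyGetD st.1 (v - 1) false)
  (cur :: PySem.List.slice st.1 none (some (maxg - 1)),
   if cur then st.2 ++ [n] else st.2)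

def pvStB (G : List Int) (maxg : Int) (c : Nat) : List Bool × List Int :=
  (PySem.List.pyRange 1 (1 + (c : Int)) 1).foldl (pvStepB G maxg)
    ([true] ++ List.replicate (maxg - 1).toNat false, [])

theorem getD_take_of_lt : ∀ (l : List Bool) (k i : Nat), i < k →
    (l.take k).getD i false = l.getD i false := by
  intro l
  induction l with
  | nil => intro k i _; simp
  | cons b t ih =>
    intro k i hik
    cases k with
    | zero => omega
    | succ k =>
      cases i with
      | zero => simp
      | succ i => simpa using ih k i (by omega)

theorem pvCurB_iff {G : List Int} {maxg : Int} (HG : ∀ g ∈ G, 1 ≤ g)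
    (hmax : ∀ g ∈ G, g ≤ maxg) {W : List Bool} {c : Nat}
    (hW : ∀ i : Nat, i < maxg.toNat →
      (W.getD i false = true ↔
        ((c : Int) - i = 0 ∨ (1 ≤ (c : Int) - i ∧ pvReach G ((c : Int) - i))))) :
    ((G.any (fun v => decide (v ≤ ((c : Int) + 1)) && PySem.List.pyGetD W (v - 1) false)) = true)
      ↔ pvReach G ((c : Int) + 1) := by
  rw [List.any_eq_true]
  constructor
  · rintro ⟨v, hvG, hv⟩
    rw [Bool.and_eq_true, decide_eq_true_iff] at hv
    obtain ⟨hvle, hget⟩ := hv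
    have hv1 := HG v hvG
    have hvm := hmax v hvG
    have hidx : (v - 1) = (((v - 1).toNat : Nat) : Int) := by omega
    rw [hidx, PySem.List.pyGetD_natCast] at hget
    have hlt : (v - 1).toNat < maxg.toNat := by omega
    rcases (hW _ hlt).mp hget with h0 | ⟨h1, hre⟩
    · have hveq : v = (c : Int) + 1 := by omega
      exact ⟨1, .one (hveq ▸ hvG)⟩
    · obtain ⟨k, hk⟩ := hre
      have heq : (((c : Int) - ((v - 1).toNat : Int)) + v) = (c : Int) + 1 := by omega
      exact heq ▸ ⟨k + 1, hk.succ hvG⟩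
  · rintro ⟨k, hk⟩
    obtain ⟨w, hw, hk⟩ : ∃ w, w = (c : Int) + 1 ∧ pvSumN G k w := ⟨_, rfl, hk⟩
    cases hk with
    | one hx =>
      refine ⟨w, hx, ?_⟩
      rw [Bool.and_eq_true, decide_eq_true_iff]
      have hw1 := HG w hx
      have hwm := hmax w hx
      refine ⟨by omega, ?_⟩
      have hidx : (w - 1) = (((w - 1).toNat : Nat) : Int) := by omega
      rw [hidx, PySem.List.pyGetD_natCast]
      exact (hW _ (by omega)).mpr (Or.inl (by omega))
    | @succ k' y g hn hg =>
      have hk'1 := pvSumN_one_le hn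
      have hy1 : (k' : Int) ≤ y := pvSumN_le HG hn
      have hg1 := HG g hg
      have hgm := hmax g hg
      refine ⟨g, hg, ?_⟩
      rw [Bool.and_eq_true, decide_eq_true_iff]
      refine ⟨by omega, ?_⟩
      have hidx : (g - 1) = (((g - 1).toNat : Nat) : Int) := by omega
      rw [hidx, PySem.List.pyGetD_natCast]
      refine (hW _ (by omega)).mpr (Or.inr ⟨by omega, ?_⟩)
      have hyy : (c : Int) - ((g - 1).toNat : Int) = y := by omega
      exact hyy ▸ ⟨k', hn⟩

theorem pvStB_spec {G : List Int} {maxg : Int} (HG : ∀ g ∈ G, 1 ≤ g)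
    (hmax : ∀ g ∈ G, g ≤ maxg) (hm1 : 1 ≤ maxg) :
    ∀ c : Nat,
    ((pvStB G maxg c).1.length = maxg.toNat
    ∧ (∀ i : Nat, i < maxg.toNat →
        ((pvStB G maxg c).1.getD i false = true ↔
          ((c : Int) - i = 0 ∨ (1 ≤ (c : Int) - i ∧ pvReach G ((c : Int) - i))))))
    ∧ (pvStB G maxg c).2.Pairwise (· < ·)
    ∧ (∀ x ∈ (pvStB G maxg c).2, x ≤ (c : Int))
    ∧ (∀ x : Int, x ∈ (pvStB G maxg c).2 ↔ 1 ≤ x ∧ x ≤ (c : Int) ∧ pvReach G x) := by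
  intro c
  induction c with
  | zero =>
    have h0 : pvStB G maxg 0 = ([true] ++ List.replicate (maxg - 1).toNat false, []) := by
      rw [pvStB]
      have h1 : (1 : Int) + ((0 : Nat) : Int) = 1 := by norm_num
      rw [h1, PySem.List.pyRange_one_eq_nil (le_refl 1), List.foldl_nil]
    rw [h0]
    refine ⟨⟨by simp; omega, ?_⟩, by simp, by simp, by simp; intro x h1 h2 _; omega⟩
    intro i hi
    cases i with
    | zero => simp
    | succ i =>
      rw [List.singleton_append, List.getD_cons_succ]
      have hL : (List.replicate (maxg - 1).toNat false).getD i false = false := by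
        rw [List.getD, List.getElem?_replicate]
        split <;> rfl
      rw [hL]
      refine ⟨fun h => absurd h (by simp), ?_⟩
      rintro (h | ⟨h1, _⟩)
      · exfalso; push_cast at h; omega
      · exfalso; push_cast at h1; omega
  | succ c ih =>
    obtain ⟨⟨P1, P2⟩, P3, P4, P5⟩ := ih
    have hstep : pvStB G maxg (c + 1) = pvStepB G maxg (pvStB G maxg c) ((c : Int) + 1) := by
      rw [pvStB, pvStB]
      have h1 : (1 + ((c + 1 : Nat) : Int)) = (1 + (c : Int)) + 1 := by push_cast; ring
      rw [h1, PySem.List.pyRange_one_succ_right (by omega), List.foldl_append,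
        List.foldl_cons, List.foldl_nil]
      have h2 : (1 + (c : Int)) = (c : Int) + 1 := by ring
      rw [h2]
    have hcur := pvCurB_iff (maxg := maxg) HG hmax P2
    have hslice : PySem.List.slice (pvStB G maxg c).1 none (some (maxg - 1)) =
        (pvStB G maxg c).1.take (maxg - 1).toNat := by
      have h1 : (maxg - 1) = (((maxg - 1).toNat : Nat) : Int) := by omega
      rw [h1, PySem.List.slice_to_natCast]
      simp
    have hst : pvStB G maxg (c + 1) =
        ((G.any (fun v => decide (v ≤ ((c : Int) + 1)) &&
            PySem.List.pyGetD (pvStB G maxg c).1 (v - 1) false)) ::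
          PySem.List.slice (pvStB G maxg c).1 none (some (maxg - 1)),
         if (G.any (fun v => decide (v ≤ ((c : Int) + 1)) &&
              PySem.List.pyGetD (pvStB G maxg c).1 (v - 1) false)) then
           (pvStB G maxg c).2 ++ [(c : Int) + 1] else (pvStB G maxg c).2) := by
      rw [hstep]; rfl
    have harith : ∀ i : Nat, (((c + 1 : Nat)) : Int) - ((i + 1 : Nat) : Int) = (c : Int) - i := by
      intro i; push_cast; ring
    -- the shared window part
    have hwin : ∀ i : Nat, i < maxg.toNat →
        (((G.any (fun v => decide (v ≤ ((c : Int) + 1)) &&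
            PySem.List.pyGetD (pvStB G maxg c).1 (v - 1) false)) ::
          PySem.List.slice (pvStB G maxg c).1 none (some (maxg - 1))).getD i false = true ↔
          (((c + 1 : Nat) : Int) - i = 0 ∨
            (1 ≤ ((c + 1 : Nat) : Int) - i ∧ pvReach G (((c + 1 : Nat) : Int) - i)))) := by
      intro i hi
      cases i with
      | zero =>
        rw [List.getD_cons_zero]
        have hr : (((c + 1 : Nat) : Int) - ((0 : Nat) : Int)) = (c : Int) + 1 := by
          push_cast; ring
        simp only [Nat.cast_zero, sub_zero] at *
        constructor
        · intro h
          refine Or.inr ⟨by push_cast; omega, ?_⟩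
          have := hcur.mp h
          have hc1 : ((c + 1 : Nat) : Int) = (c : Int) + 1 := by push_cast; ring
          rwa [hc1]
        · rintro (h | ⟨_, hre⟩)
          · exfalso; push_cast at h; omega
          · apply hcur.mpr
            have hc1 : ((c + 1 : Nat) : Int) = (c : Int) + 1 := by push_cast; ring
            rwa [hc1] at hre
      | succ i =>
        rw [List.getD_cons_succ, hslice, getD_take_of_lt _ _ _ (by omega),
          harith i, P2 i (by omega)]
    by_cases hcnd : (G.any (fun v => decide (v ≤ ((c : Int) + 1)) &&
        PySem.List.pyGetD (pvStB G maxg c).1 (v - 1) false)) = true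
    · have hreach : pvReach G ((c : Int) + 1) := hcur.mp hcnd
      rw [hst, if_pos hcnd]
      refine ⟨⟨?_, hwin⟩, ?_, ?_, ?_⟩
      · simp [hslice, List.length_take, P1]
        omega
      · rw [List.pairwise_append]
        refine ⟨P3, by simp, ?_⟩
        intro x hx y hy
        rw [List.mem_singleton] at hy
        subst hy
        have := P4 x hx
        omega
      · intro x hx
        rcases List.mem_append.mp hx with h | h
        · have := P4 x h; push_cast; omega
        · rw [List.mem_singleton] at h; subst h; push_cast; omega
      · intro x
        rw [List.mem_append, List.mem_singleton, P5]
        constructor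
        · rintro (⟨a, b, r⟩ | rfl)
          · exact ⟨a, by push_cast; omega, r⟩
          · exact ⟨by omega, by push_cast; omega, hreach⟩
        · rintro ⟨a, b, r⟩
          push_cast at b
          rcases Int.lt_or_le x ((c : Int) + 1) with h | h
          · exact Or.inl ⟨a, by omega, r⟩
          · exact Or.inr (by omega)
    · have hnreach : ¬ pvReach G ((c : Int) + 1) := fun h => hcnd (hcur.mpr h)
      rw [hst, if_neg hcnd]
      refine ⟨⟨?_, hwin⟩, P3, ?_, ?_⟩
      · simp [hslice, List.length_take, P1]
        omega
      · intro x hx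
        have := P4 x hx
        push_cast
        omega
      · intro x
        rw [P5]
        constructor
        · rintro ⟨a, b, r⟩
          exact ⟨a, by push_cast; omega, r⟩
        · rintro ⟨a, b, r⟩
          refine ⟨a, ?_, r⟩
          push_cast at b
          rcases Int.lt_or_le x ((c : Int) + 1) with h | h
          · omega
          · have hx1 : x = (c : Int) + 1 := by omega
            exact absurd (hx1 ▸ r) hnreach

-- ===== VERDICT (by name: the statement is the Claim_ definition above) =====
theorem ListByGens_spec : Claim_equal_ListByGens := by
  unfold Claim_equal_ListByGens
  intro gens _ hpre
  unfold Spec_ListByGens ListByGens ListByGens_alt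
  simp only [pvNewGenniesA_eq]
  have hvals : gens.map (fun g => g) = gens := by simp
  rw [hvals]
  have hKfold : gens.filter (fun g => !(gens.any (fun h => !(h == g) && PySem.Int.mod g h == 0)))
      = pvKeep gens := rfl
  rw [hKfold]
  by_cases hlen : (pvKeep gens).length < 2
  · have hcondA : (decide (PySem.List.len (pvKeep gens) < 2)
        || !(pvGcdListA (pvKeep gens) == 1)) = true := by
      simp [PySem.List.len_eq]
      omega
    rw [if_pos hcondA, if_pos hlen]
  · have hgcdA : pvGcdListA (pvKeep gens) = ((pvGcdAll (pvKeep gens) : Nat) : Int) :=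
      pvGcdListA_eq _ (by omega)
    have hgcdB : (pvKeep gens).foldl (fun d v => ((Int.gcd d v : Nat) : Int)) 0 =
        ((pvGcdAll (pvKeep gens) : Nat) : Int) := by
      have h := pvFoldGcd_eq (pvKeep gens) 0
      simpa using h
    rw [if_neg hlen, hgcdB]
    by_cases hg1 : pvGcdAll (pvKeep gens) = 1
    · have hcondA : (decide (PySem.List.len (pvKeep gens) < 2)
          || !(pvGcdListA (pvKeep gens) == 1)) = false := by
        simp [PySem.List.len_eq, hgcdA, hg1]
        omega
      rw [if_neg (by rw [hcondA]; simp)]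
      rw [if_neg (by simp [hg1])]
      -- main case: here Pre_'s degenerate-gate disjunct is impossible, so all
      -- elements are positive
      have hpos : ∀ x ∈ gens, 1 ≤ x := by
        rcases hpre with hpos | ⟨_, hOr⟩
        · exact hpos
        · exfalso
          rw [pvKeep_eq_dvdFilter] at hOr
          rcases hOr with h | h
          · omega
          · apply h
            have hfold := pvFoldGcd_eq (pvKeep gens) 0
            simpa [hg1] using hfold
      have hKpos : ∀ g ∈ pvKeep gens, 1 ≤ g := fun g hg => hpos g (List.mem_of_mem_filter hg)
      -- main case
      have hKne : pvKeep gens ≠ [] := by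
        intro h
        rw [h] at hlen
        simp at hlen
      obtain ⟨mx, hmx⟩ : ∃ mx, PySem.List.max? (pvKeep gens) (fun x => x) = some mx := by
        cases h : PySem.List.max? (pvKeep gens) (fun x => x) with
        | none =>
          rw [PySem.List.max?_eq_none_iff] at h
          exact absurd h hKne
        | some mx => exact ⟨mx, rfl⟩
      obtain ⟨mn, hmn⟩ : ∃ mn, PySem.List.min? (pvKeep gens) (fun x => x) = some mn := by
        cases h : PySem.List.min? (pvKeep gens) (fun x => x) with
        | none =>
          rw [PySem.List.min?_eq_none_iff] at h
          exact absurd h hKne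
        | some mn => exact ⟨mn, rfl⟩
      rw [hmx, hmn]
      simp only [Option.getD_some]
      have hmx1 : 1 ≤ mx := hKpos mx (PySem.List.max?_mem hmx)
      have hmn1 : 1 ≤ mn := hKpos mn (PySem.List.min?_mem hmn)
      have HF : 1 ≤ mx * mn := by
        have h := mul_le_mul hmx1 hmn1 (by omega) (by omega)
        simpa using h
      have hA := pvLoopA_spec (G := pvKeep gens) (F := mx * mn) hKpos
        (2 * (mx * mn).toNat + 4) 0 0 (Or.inl rfl)
      rw [show pvLayer (pvKeep gens) 0 = pvKeep gens from rfl,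
        show pvElems (pvKeep gens) 0 = [] from rfl] at hA
      have hmaxK : ∀ g ∈ pvKeep gens, g ≤ mx := by
        intro g hg
        exact PySem.List.max?_isMax hmx g hg
      have hB := pvStB_spec (G := pvKeep gens) (maxg := mx) hKpos hmaxK (by omega)
        (mx * mn).toNat
      -- the port-B fold is pvStB at c = (mx*mn).toNat
      have hrange : mx * mn + 1 = 1 + (((mx * mn).toNat : Nat) : Int) := by omega
      have hstb : (PySem.List.pyRange 1 (mx * mn + 1) 1).foldl
          (fun (st : List Bool × List Int) n =>
            let cur := (pvKeep gens).any (fun v => decide (v ≤ n) &&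
              PySem.List.pyGetD st.1 (v - 1) false)
            (cur :: PySem.List.slice st.1 none (some (mx - 1)),
             if cur then st.2 ++ [n] else st.2))
          ([true] ++ List.replicate (mx - 1).toNat false, [])
          = pvStB (pvKeep gens) mx (mx * mn).toNat := by
        rw [pvStB, ← hrange]
        rfl
      rw [hstb]
      -- both lists are strictly sorted with the same membership
      set M := pvLoopA (pvKeep gens) (mx * mn) (2 * (mx * mn).toNat + 4) (pvKeep gens) [] 0 with hM
      have pwA : (pvTakeA M (mx * mn)).Pairwise (· < ·) := pairwise_pvTakeA hA.1
      have pwB : (pvStB (pvKeep gens) mx (mx * mn).toNat).2.Pairwise (· < ·) :=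
        hB.2.1
      have memiff : ∀ x, x ∈ pvTakeA M (mx * mn) ↔
          x ∈ (pvStB (pvKeep gens) mx (mx * mn).toNat).2 := by
        intro x
        rw [mem_pvTakeA hA.1, hB.2.2.2 x]
        constructor
        · rintro ⟨hxM, hxF⟩
          have hre := hA.2.1 x hxM
          exact ⟨pvReach_pos hKpos hre, by omega, hre⟩
        · rintro ⟨h1, h2, hre⟩
          obtain ⟨j, hj⟩ := hre
          have hj1 := pvSumN_one_le hj
          have hjx := pvSumN_le hKpos hj
          refine ⟨hA.2.2 x j (by omega) hj1 (by omega) hj, by omega⟩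
      have hperm : (pvTakeA M (mx * mn)).Perm
          (pvStB (pvKeep gens) mx (mx * mn).toNat).2 := by
        rw [List.perm_ext_iff_of_nodup
          (pwA.imp (fun h => ne_of_lt h)) (pwB.imp (fun h => ne_of_lt h))]
        exact memiff
      exact PySem.List.eq_of_perm_of_pairwise_le_of_injective (fun x => x)
        (fun a b h => h) hperm (pwA.imp (fun h => le_of_lt h)) (pwB.imp (fun h => le_of_lt h))
    · have hcondA : (decide (PySem.List.len (pvKeep gens) < 2)
          || !(pvGcdListA (pvKeep gens) == 1)) = true := by
        have : pvGcdListA (pvKeep gens) ≠ 1 := by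
          rw [hgcdA]
          intro h
          exact hg1 (by exact_mod_cast h)
        simp [this]
      rw [if_pos hcondA, if_pos (by simp; exact_mod_cast fun h => hg1 (by exact_mod_cast h))]
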